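-- pv_equiv track=rewrite | github.com/Niklasvdm/2021WV_ESystant | Random_For_Now.py | somefunct
-- ===== SOURCE A (Python) =====
-- from collections import Counter
--
-- def somefunct(listofsets, length):
--     subsets = []
--     for x in range(len(listofsets) - length + 1):
--         subs = []
--         for y in range(length):
--             if len(subs) == 0:
--                 subs = list(listofsets[x])
--             else:
--                 temp = []
--                 for a in listofsets[x + y]:
--                     for z in range(len(subs)):
--                         temp.append(subs[z] + a)
--                 subs = temp
--         subsets += subs
--     return Counter(subsets)
-- ===== SOURCE B (Python) =====
-- from collections import Counter
--
--
-- def _conv(c, s):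
--     # convolve a counter of partial sums with one set
--     d = Counter()
--     for a in s:
--         for v, m in c.items():
--             d[v + a] += m
--     return d
--
--
-- def somefunct(listofsets, length):
--     # Streaming sliding-window aggregation: ONE pass over listofsets keeping a
--     # queue of concurrent partial-sum counters (one per in-progress window);
--     # each incoming set updates every partial, the oldest window completes and
--     # is merged into the running total — no per-window nested product loops.
--     if length <= 0:
--         return Counter()
--     n = len(listofsets)
--     total = Counter()
--     active = []  # partial counters of in-progress windows, oldest first
--     for i, s in enumerate(listofsets):
--         nxt = [_conv(c, s) for c in active]
--         if i + length <= n: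
--             nxt.append(Counter(s))  # window starting at i
--         if i >= length - 1:
--             total.update(nxt[0])  # window i-length+1 is complete
--             nxt = nxt[1:]
--         active = nxt
--     return total
-- ===== Notes on version B (the rewrite author's own statement) =====
-- stated objective: alternative
-- what changed: Replaces A's per-window nested loops (for each window, re-enumerate the whole Cartesian product into a list, counted at the end) by a streaming sliding-window aggregation: one pass over listofsets maintaining a queue of concurrent partial-sum counters, each incoming set convolved into every in-progress window, the oldest window completing and merging into a running total; equal partial sums are merged as counts instead of being materialised as tuples.
-- intended difference: On inputs where some window has a nonempty first set, at least one empty set after it, and an evenly long run of trailing empty sets, A's 'if len(subs)==0: subs=list(listofsets[x])' reload resurrects the already-emptied product and A returns spurious counts (A([[1],[],[2]],3) = Counter({1: 1})), while B returns the empty counter there, the intended value since a window containing an empty set has an empty Cartesian product. — e.g. on somefunct([[1], [], [2]], 3): A returns [(1, 1)], B returns []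
import Mathlib
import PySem

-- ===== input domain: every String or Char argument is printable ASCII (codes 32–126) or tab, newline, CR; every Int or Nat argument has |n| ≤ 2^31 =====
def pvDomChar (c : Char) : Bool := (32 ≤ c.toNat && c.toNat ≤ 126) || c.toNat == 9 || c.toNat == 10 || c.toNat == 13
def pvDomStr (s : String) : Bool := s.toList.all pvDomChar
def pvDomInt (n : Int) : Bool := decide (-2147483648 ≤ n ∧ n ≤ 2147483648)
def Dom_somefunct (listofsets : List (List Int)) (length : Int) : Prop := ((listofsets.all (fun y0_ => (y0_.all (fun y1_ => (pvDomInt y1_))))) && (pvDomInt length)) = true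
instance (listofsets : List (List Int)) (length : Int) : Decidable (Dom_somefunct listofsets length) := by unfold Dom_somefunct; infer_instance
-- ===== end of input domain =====

-- B replaces A's per-window nested product loops by a streaming sliding-window
-- aggregation: one pass over listofsets with a queue of concurrent partial-sum
-- counters, the oldest window completing into a running total; on windows that
-- contain an empty set A's reload quirk can return spurious counts (see D_
-- below), B returns the intended empty count there.

-- ===== PORT A =====
def somefunct (listofsets : List (List Int)) (length : Int) : List (Int × Int) :=
  let subsets := (PySem.List.pyRange 0 ((PySem.List.len listofsets) - length + 1) 1).foldl
    (fun subsets x =>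
      let subs := (PySem.List.pyRange 0 length 1).foldl
        (fun subs y =>
          if subs.length = 0 then
            -- listofsets[x]: index always in range when this loop body runs
            PySem.List.pyGetD listofsets x []
          else
            -- temp built by appending subs[z] + a, then subs = temp
            (PySem.List.pyGetD listofsets (x + y) []).foldl
              (fun temp a =>
                (PySem.List.pyRange 0 (PySem.List.len subs) 1).foldl
                  (fun temp z => temp ++ [PySem.List.pyGetD subs z 0 + a]) temp)
              [])
        []
      subsets ++ subs)
    []
  (PySem.Dict.counter subsets).items

-- ===== PORT B =====
-- helper _conv: convolve a counter of partial sums with one set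
def convD (c : PySem.Dict Int Int) (s : List Int) : PySem.Dict Int Int :=
  s.foldl (fun d a => c.items.foldl (fun d p => d.modify (p.1 + a) 0 (· + p.2)) d)
    PySem.Dict.empty

def somefunct_alt (listofsets : List (List Int)) (length : Int) : List (Int × Int) :=
  if length ≤ 0 then [] else
    (((PySem.List.enumerate listofsets 0).foldl
        (fun (st : List (PySem.Dict Int Int) × PySem.Dict Int Int) is =>
          let nxt := st.1.map (fun c => convD c is.2)
          let nxt := if is.1 + length ≤ PySem.List.len listofsets
                     then nxt ++ [PySem.Dict.counter is.2] else nxt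
          if is.1 ≥ length - 1 then
            (nxt.tail,
             (nxt.headD PySem.Dict.empty).items.foldl
               (fun t p => t.modify p.1 0 (· + p.2)) st.2)
          else (nxt, st.2))
        ([], PySem.Dict.empty)).2).items

-- ===== PRECONDITION & SPEC =====
-- On inputs where some window has a nonempty first set, at least one empty set after it,
-- and an evenly long run of trailing empty sets, A's reload of the window's first set
-- resurrects the already-emptied product and A returns spurious counts, while B returns
-- the empty count for such a window — the intended value, since a window containing an
-- empty set has an empty Cartesian product.
def D_somefunct (listofsets : List (List Int)) (length : Int) : Prop :=
  ∃ x < listofsets.length, (x : Int) + length ≤ listofsets.length ∧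
    (let W := (listofsets.drop x).take length.toNat
     W.headD [] ≠ [] ∧ [] ∈ W.tail ∧ Even ((W.reverse.takeWhile (fun s => s.isEmpty)).length))
instance (listofsets : List (List Int)) (length : Int) : Decidable (D_somefunct listofsets length) := by
  unfold D_somefunct; infer_instance

def Spec_somefunct (listofsets : List (List Int)) (length : Int) (out : List (Int × Int)) : Prop :=
  ¬ D_somefunct listofsets length → out = somefunct_alt listofsets length
instance (listofsets : List (List Int)) (length : Int) (out : List (Int × Int)) : Decidable (Spec_somefunct listofsets length out) := by
  unfold Spec_somefunct; infer_instance

def pvDiffWitness_somefunct : List (List Int) × Int := ([[1], [], [2]], 3)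
def pvDiffWitnessOut_somefunct : (List (Int × Int)) × (List (Int × Int)) := ([(1, 1)], [])

-- ===== CLAIM (what is proved, stated in full; the proofs are below) =====
def Claim_unchanged_somefunct : Prop := ∀ (listofsets : List (List Int)) (length : Int), Dom_somefunct listofsets length → Spec_somefunct listofsets length (somefunct listofsets length)
def Claim_exact_somefunct : Prop := ∀ (listofsets : List (List Int)) (length : Int), Dom_somefunct listofsets length → D_somefunct listofsets length → somefunct listofsets length ≠ somefunct_alt listofsets length
def Claim_changed_somefunct : Prop := Dom_somefunct (pvDiffWitness_somefunct.1) (pvDiffWitness_somefunct.2) ∧ D_somefunct (pvDiffWitness_somefunct.1) (pvDiffWitness_somefunct.2) ∧ somefunct (pvDiffWitness_somefunct.1) (pvDiffWitness_somefunct.2) = pvDiffWitnessOut_somefunct.1 ∧ somefunct_alt (pvDiffWitness_somefunct.1) (pvDiffWitness_somefunct.2) = pvDiffWitnessOut_somefunct.2 ∧ pvDiffWitnessOut_somefunct.1 ≠ pvDiffWitnessOut_somefunct.2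

-- ===== LEMMAS AND PROOFS =====

def convL (subs s : List Int) : List Int := s.flatMap (fun a => subs.map (· + a))

theorem addShift_getD (f : Int → Int) (ps : List (Int × Int)) (t : PySem.Dict Int Int) (k : Int) :
    (ps.foldl (fun t p => t.modify (f p.1) 0 (· + p.2)) t).getD k 0
      = t.getD k 0 + ((ps.filter (fun p => f p.1 == k)).map (·.2)).sum := by
  induction ps generalizing t with
  | nil => simp
  | cons p ps ih =>
    simp only [List.foldl_cons, ih, List.filter_cons]
    rw [PySem.Dict.getD_modify]
    by_cases h : f p.1 = k
    · simp [h]; ring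
    · simp [h]
      intro hk; exact absurd hk.symm h

theorem set_update_add (t s : List Int) (x : Int) :
    PySem.Set.update t (PySem.Set.add s x) = PySem.Set.add (PySem.Set.update t s) x := by
  by_cases h : x ∈ s
  · rw [PySem.Set.add_of_mem h, PySem.Set.add_of_mem ((PySem.Set.mem_update _ _ _).mpr (Or.inr h))]
  · rw [PySem.Set.add_of_not_mem h, PySem.Set.update_append]
    simp [PySem.Set.update_cons, PySem.Set.update_nil]

theorem set_update_ofList (t m : List Int) :
    PySem.Set.update t (PySem.Set.ofList m) = PySem.Set.update t m := by
  induction m using List.reverseRecOn with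
  | nil => simp [PySem.Set.ofList_nil]
  | append_singleton m x ih =>
    rw [PySem.Set.ofList_append_singleton, set_update_add, PySem.Set.update_append, ih]
    simp [PySem.Set.update_cons, PySem.Set.update_nil]

theorem set_add_map_inj (f : Int → Int) (hf : Function.Injective f) (s : List Int) (x : Int) :
    (PySem.Set.add s x).map f = PySem.Set.add (s.map f) (f x) := by
  by_cases h : x ∈ s
  · rw [PySem.Set.add_of_mem h, PySem.Set.add_of_mem (List.mem_map_of_mem h)]
  · rw [PySem.Set.add_of_not_mem h, PySem.Set.add_of_not_mem]
    · simp
    · intro hc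
      rcases List.mem_map.mp hc with ⟨y, hy, hyx⟩
      exact h (hf hyx ▸ hy)

theorem set_ofList_map_inj (f : Int → Int) (hf : Function.Injective f) (m : List Int) :
    (PySem.Set.ofList m).map f = PySem.Set.ofList (m.map f) := by
  induction m using List.reverseRecOn with
  | nil => simp [PySem.Set.ofList_nil]
  | append_singleton m x ih =>
    rw [PySem.Set.ofList_append_singleton, set_add_map_inj f hf, ih, List.map_append,
      List.map_singleton, PySem.Set.ofList_append_singleton]

theorem sum_count_ofList_filter (L : List Int) (q : Int → Bool) :
    (((PySem.Set.ofList L).filter q).map (fun a => L.count a)).sum = L.countP q := by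
  have hnd : ((PySem.Set.ofList L).filter q).Nodup :=
    (PySem.Set.nodup_ofList (xs := L)).filter q
  rw [← List.sum_toFinset _ hnd]
  have hfs : ((PySem.Set.ofList L).filter q).toFinset = (L.filter q).toFinset := by
    ext a
    simp [List.mem_toFinset, PySem.Set.mem_ofList]
  rw [hfs]
  have : ∑ a ∈ (L.filter q).toFinset, L.count a
      = ∑ a ∈ (L.filter q).toFinset, (L.filter q).count a := by
    apply Finset.sum_congr rfl
    intro a ha
    have hq : q a = true := (List.mem_filter.mp (List.mem_toFinset.mp ha)).2
    simp [List.count_filter, hq]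
  rw [this, List.sum_toFinset_count_eq_length, List.countP_eq_length_filter]

theorem grouped_eq_single (f : Int → Int) (hf : Function.Injective f) (L : List Int)
    (t : PySem.Dict Int Int) (ht : t.keys.Nodup) :
    (PySem.Dict.counter L).items.foldl (fun d p => d.modify (f p.1) 0 (· + p.2)) t
      = (L.map f).foldl (fun d x => d.modify x 0 (· + 1)) t := by
  have hndL : ((PySem.Dict.counter L).items.foldl (fun d p => d.modify (f p.1) 0 (· + p.2)) t).keys.Nodup :=
    PySem.Dict.nodup_keys_foldl_modify_key _ (fun p : Int × Int => f p.1) 0 (fun (_ : PySem.Dict Int Int) (p : Int × Int) => (· + p.2)) t ht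
  have hndR : ((L.map f).foldl (fun d x => d.modify x 0 (· + 1)) t).keys.Nodup :=
    PySem.Dict.nodup_keys_foldl_modify_key _ (fun x : Int => x) 0 (fun (_ : PySem.Dict Int Int) (_ : Int) => (· + 1)) t ht
  have hkeysL : ((PySem.Dict.counter L).items.foldl (fun d p => d.modify (f p.1) 0 (· + p.2)) t).keys
      = PySem.Set.update t.keys (L.map f) := by
    rw [PySem.Dict.keys_foldl_modify_key _ (fun p : Int × Int => f p.1) 0 (fun (_ : PySem.Dict Int Int) (p : Int × Int) => (· + p.2)) t]
    rw [PySem.Dict.items_counter, List.map_map]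
    have : ((fun p : Int × Int => f p.1) ∘ fun k => (k, (L.count k : Int))) = f := rfl
    rw [this, set_ofList_map_inj f hf, set_update_ofList]
  have hkeysR : ((L.map f).foldl (fun d x => d.modify x 0 (· + 1)) t).keys
      = PySem.Set.update t.keys (L.map f) :=
    PySem.Dict.keys_foldl_modify _ 0 (fun _ _ => (· + 1)) t
  have hgetD : ∀ k, ((PySem.Dict.counter L).items.foldl (fun d p => d.modify (f p.1) 0 (· + p.2)) t).getD k 0
      = ((L.map f).foldl (fun d x => d.modify x 0 (· + 1)) t).getD k 0 := by
    intro k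
    rw [addShift_getD, PySem.Dict.getD_foldl_modify_add_one]
    congr 1
    rw [PySem.Dict.items_counter, List.filter_map]
    have hcomp : ((fun p : Int × Int => f p.1 == k) ∘ fun a => (a, (L.count a : Int)))
        = fun a => f a == k := rfl
    rw [hcomp, List.map_map]
    have hm : ((fun p : Int × Int => p.2) ∘ fun a => (a, (L.count a : Int)))
        = fun a => ((L.count a : Int)) := rfl
    rw [hm]
    have := sum_count_ofList_filter L (fun a => f a == k)
    have hcast : ((((PySem.Set.ofList L).filter (fun a => f a == k)).map (fun a => (L.count a : Int)))).sum
        = ((L.countP (fun a => f a == k) : Nat) : Int) := by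
      rw [← this, Nat.cast_list_sum, List.map_map]
      rfl
    rw [hcast]
    congr 1
    rw [List.count_eq_countP, List.countP_map]
    rfl
  apply PySem.Dict.ext
  rw [PySem.Dict.items_eq_map_keys _ hndL 0, PySem.Dict.items_eq_map_keys _ hndR 0, hkeysL, hkeysR]
  exact List.map_congr_left (fun k _ => by rw [hgetD k])

theorem add_right_injective' (a : Int) : Function.Injective (fun v : Int => v + a) :=
  fun x y h => by simpa using h

theorem counter_append (l1 l2 : List Int) :
    PySem.Dict.counter (l1 ++ l2)
      = l2.foldl (fun d x => d.modify x 0 (· + 1)) (PySem.Dict.counter l1) := by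
  rw [PySem.Dict.counter_eq_foldl, PySem.Dict.counter_eq_foldl, List.foldl_append]

theorem conv_eq (L s : List Int) :
    s.foldl (fun nxt a => (PySem.Dict.counter L).items.foldl
        (fun nxt p => nxt.modify (p.1 + a) 0 (· + p.2)) nxt) PySem.Dict.empty
      = PySem.Dict.counter (convL L s) := by
  induction s using List.reverseRecOn with
  | nil => simp [convL, PySem.Dict.counter_eq_foldl]
  | append_singleton s a ih =>
    rw [List.foldl_append, List.foldl_cons, List.foldl_nil, ih]
    have : convL L (s ++ [a]) = convL L s ++ L.map (· + a) := by
      simp [convL]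
    rw [this, counter_append]
    exact grouped_eq_single (fun v => v + a) (add_right_injective' a) L
      (PySem.Dict.counter (convL L s)) (PySem.Dict.nodup_keys_counter _)

theorem convD_counter (L s : List Int) :
    convD (PySem.Dict.counter L) s = PySem.Dict.counter (convL L s) := by
  unfold convD
  exact conv_eq L s

theorem merge_eq (g : List Int) (t : PySem.Dict Int Int) (ht : t.keys.Nodup) :
    (PySem.Dict.counter g).items.foldl (fun t p => t.modify p.1 0 (· + p.2)) t
      = g.foldl (fun d x => d.modify x 0 (· + 1)) t := by
  have := grouped_eq_single (fun v => v) (fun x y h => h) g t ht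
  simpa using this

def stepA (h subs s : List Int) : List Int := if subs.length = 0 then h else convL subs s

def prodW (W : List (List Int)) : List Int :=
  match W with
  | [] => []
  | h :: t => t.foldl convL h

def runW (W : List (List Int)) : List Int := W.foldl (stepA (W.headD [])) []

theorem convL_ne (subs s : List Int) (h1 : subs ≠ []) (h2 : s ≠ []) : convL subs s ≠ [] := by
  rcases s with _ | ⟨a, s'⟩
  · exact absurd rfl h2
  · rcases subs with _ | ⟨b, subs'⟩
    · exact absurd rfl h1
    · simp [convL]

theorem foldl_convL_nil (t : List (List Int)) : t.foldl convL [] = [] := by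
  induction t with
  | nil => rfl
  | cons s t ih =>
    have hc : convL [] s = [] := by
      induction s with
      | nil => rfl
      | cons a s ihs => simpa [convL] using ihs
    rw [List.foldl_cons, hc, ih]

theorem prod_empty_of_mem (t : List (List Int)) (h : [] ∈ t) (acc : List Int) :
    t.foldl convL acc = [] := by
  induction t generalizing acc with
  | nil => simp at h
  | cons s t ih =>
    rcases List.mem_cons.mp h with hs | hs
    · rw [List.foldl_cons, ← hs]
      have : convL acc [] = [] := by simp [convL]
      rw [this, foldl_convL_nil]
    · exact ih hs _

theorem stepA_ne (h acc s : List Int) (hh : h ≠ []) (hs : s ≠ []) : stepA h acc s ≠ [] := by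
  unfold stepA
  split
  · exact hh
  · next hacc => exact convL_ne acc s (by simpa using fun he => hacc (by simp [he])) hs

theorem foldA_nil_head (t : List (List Int)) : t.foldl (stepA []) [] = [] := by
  induction t with
  | nil => rfl
  | cons s t ih => simpa [stepA] using ih

theorem foldA_eq_conv (h : List Int) (hh : h ≠ []) (t : List (List Int)) :
    ∀ acc, acc ≠ [] → (∀ s ∈ t, s ≠ []) → t.foldl (stepA h) acc = t.foldl convL acc := by
  induction t with
  | nil => intro acc _ _; rfl
  | cons s t ih =>
    intro acc hacc hst
    have hs : s ≠ [] := hst s List.mem_cons_self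
    have hstep : stepA h acc s = convL acc s := by
      unfold stepA
      rw [if_neg (by simpa using hacc)]
    rw [List.foldl_cons, List.foldl_cons, hstep]
    exact ih (convL acc s) (convL_ne acc s hacc hs) (fun s' hs' => hst s' (List.mem_cons_of_mem _ hs'))

theorem parity_fold (h : List Int) (hh : h ≠ []) : ∀ r : Nat,
    (∀ acc : List Int, acc ≠ [] →
      (((List.replicate r ([] : List Int)).foldl (stepA h) acc = []) ↔ Odd r))
    ∧ (((List.replicate r ([] : List Int)).foldl (stepA h) [] = []) ↔ Even r) := by
  intro r
  induction r with
  | zero =>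
    constructor
    · intro acc hacc; simp [hacc, Nat.odd_iff]
    · simp
  | succ r ih =>
    constructor
    · intro acc hacc
      rw [List.replicate_succ, List.foldl_cons]
      have : stepA h acc [] = [] := by
        unfold stepA
        rw [if_neg (by simpa using hacc)]
        simp [convL]
      rw [this, ih.2]
      rw [Nat.even_iff, Nat.odd_iff]
      omega
    · rw [List.replicate_succ, List.foldl_cons]
      have : stepA h [] [] = h := by unfold stepA; simp
      rw [this, (ih.1 h hh)]
      rw [Nat.even_iff, Nat.odd_iff]
      omega

def winD (W : List (List Int)) : Prop :=
  W.headD [] ≠ [] ∧ [] ∈ W.tail ∧ Even ((W.reverse.takeWhile (fun s => s.isEmpty)).length)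

theorem trailing_len_eq (h : List Int) (t : List (List Int)) (hh : h ≠ []) :
    (((h :: t).reverse.takeWhile (fun s : List Int => s.isEmpty)).length)
      = ((t.reverse.takeWhile (fun s : List Int => s.isEmpty)).length) := by
  have hrev : (h :: t).reverse = t.reverse ++ [h] := by simp
  rw [hrev, List.takeWhile_append]
  split
  · next hlen =>
    have : List.takeWhile (fun s : List Int => s.isEmpty) [h] = [] := by
      simp [List.takeWhile_cons, List.isEmpty_iff, hh]
    rw [this]
    simp [hlen]
  · rfl

theorem runA_eq (W : List (List Int)) (hW : ¬ winD W) :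
    W.foldl (stepA (W.headD [])) [] = prodW W := by
  rcases W with _ | ⟨h, t⟩
  · rfl
  · have hhead : (h :: t).headD [] = h := rfl
    rw [hhead]
    have hfirst : stepA h [] h = h := by unfold stepA; simp
    rw [List.foldl_cons, hfirst]
    show t.foldl (stepA h) h = prodW (h :: t)
    by_cases hh : h = []
    · subst hh
      rw [foldA_nil_head]
      show ([] : List Int) = t.foldl convL []
      rw [foldl_convL_nil]
    · by_cases hmem : ([] : List Int) ∈ t
      · -- trailing empty run must be odd, else winD
        have hodd : ¬ Even ((t.reverse.takeWhile (fun s : List Int => s.isEmpty)).length) := by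
          intro he
          exact hW ⟨hh, hmem, by rw [trailing_len_eq h t hh]; exact he⟩
        -- decompose t = t0 ++ E
        set p : List Int → Bool := fun s => s.isEmpty with hp
        set t0 : List (List Int) := (t.reverse.dropWhile p).reverse with ht0
        set E : List (List Int) := (t.reverse.takeWhile p).reverse with hE
        have hdec : t = t0 ++ E := by
          rw [ht0, hE, ← List.reverse_append, List.takeWhile_append_dropWhile, List.reverse_reverse]
        have hEmem : ∀ s ∈ E, s = ([] : List Int) := by
          intro s hs
          have := List.mem_takeWhile_imp (List.mem_reverse.mp hs)
          simpa [hp, List.isEmpty_iff] using this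
        have hErep : E = List.replicate E.length ([] : List Int) := List.eq_replicate_of_mem hEmem
        have hElen : Odd E.length :=
          (Nat.even_or_odd E.length).resolve_left
            (fun he => hodd (by rw [hE] at he; simpa using he))
        have hacc1 : t0.foldl (stepA h) h ≠ [] := by
          by_cases ht0nil : t0 = []
          · rw [ht0nil]; exact hh
          · have hlast : t0.getLast ht0nil ≠ [] := by
              have hdw : t.reverse.dropWhile p ≠ [] := by
                intro hc
                apply ht0nil
                rw [ht0, hc]; rfl
              have := List.head_dropWhile_not p hdw
              have hgl : t0.getLast ht0nil = (t.reverse.dropWhile p).head hdw :=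
                List.getLast_reverse _
              rw [hgl]
              simpa [hp, List.isEmpty_iff] using this
            conv_lhs => rw [← List.dropLast_append_getLast ht0nil]
            rw [List.foldl_append, List.foldl_cons, List.foldl_nil]
            exact stepA_ne h _ _ hh hlast
        have hfinal : t.foldl (stepA h) h = [] := by
          rw [hdec, List.foldl_append]
          conv_lhs => rw [hErep]
          exact ((parity_fold h hh E.length).1 _ hacc1).mpr hElen
        rw [hfinal]
        show ([] : List Int) = t.foldl convL h
        rw [prod_empty_of_mem t hmem]
      · -- no empty set in the tail: straight product
        have hne : ∀ s ∈ t, s ≠ [] := fun s hs he => hmem (he ▸ hs)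
        show t.foldl (stepA h) h = t.foldl convL h
        exact foldA_eq_conv h hh t h hh hne

theorem foldl_range_getD {α : Type} (F : α → List Int → α) (l : List (List Int)) (x : Nat) :
    ∀ (k : Nat), x + k ≤ l.length → ∀ (init : α),
    (List.range k).foldl (fun acc y => F acc (l.getD (x + y) [])) init
      = ((l.drop x).take k).foldl F init := by
  intro k
  induction k with
  | zero => intro _ _; rfl
  | succ k ih =>
    intro hk init
    rw [List.range_succ, List.foldl_append, ih (by omega), List.foldl_cons, List.foldl_nil]
    have hxk : x + k < l.length := by omega
    have htake : (l.drop x).take (k + 1) = (l.drop x).take k ++ [l[x + k]] := by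
      rw [List.take_succ, List.getElem?_drop, List.getElem?_eq_getElem hxk]
      rfl
    have hgetD : l.getD (x + k) [] = l[x + k] := by
      rw [List.getD_eq_getElem?_getD, List.getElem?_eq_getElem hxk]
      rfl
    rw [htake, List.foldl_append, List.foldl_cons, List.foldl_nil, hgetD]

theorem head_take_drop (l : List (List Int)) (x k : Nat) (hk : 0 < k) (hx : x < l.length) :
    ((l.drop x).take k).headD [] = l.getD x [] := by
  rw [List.headD_eq_head?, List.head?_eq_getElem?, List.getElem?_take_of_lt hk,
    List.getElem?_drop, List.getD_eq_getElem?_getD]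
  simp

theorem temp_eq (subs s : List Int) :
    s.foldl (fun temp a => (PySem.List.pyRange 0 ((subs.length : Int)) 1).foldl
        (fun temp z => temp ++ [PySem.List.pyGetD subs z 0 + a]) temp) []
      = convL subs s := by
  have hinner : ∀ (temp : List Int) (a : Int),
      (PySem.List.pyRange 0 ((subs.length : Int)) 1).foldl
        (fun temp z => temp ++ [PySem.List.pyGetD subs z 0 + a]) temp
      = temp ++ subs.map (· + a) := by
    intro temp a
    have h1 := PySem.List.foldl_pyRange_zero_pyGetD' subs 0
      (fun (acc : List Int) (v : Int) => acc ++ [v + a]) temp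
    rw [h1]
    exact PySem.List.foldl_append_singleton_eq_map _ _ _
  calc s.foldl (fun temp a => (PySem.List.pyRange 0 ((subs.length : Int)) 1).foldl
        (fun temp z => temp ++ [PySem.List.pyGetD subs z 0 + a]) temp) []
      = s.foldl (fun temp a => temp ++ subs.map (· + a)) [] := by
        apply PySem.List.foldl_congr_mem
        intro acc x _
        exact hinner acc x
    _ = convL subs s := by
        rw [PySem.List.foldl_append_eq_flatMap]
        rfl

theorem A_window (l : List (List Int)) (length : Int) (x : Int)
    (hx0 : 0 ≤ x) (hxb : x.toNat + length.toNat ≤ l.length) (hlen : 1 ≤ length) :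
    (PySem.List.pyRange 0 length 1).foldl
      (fun subs y =>
        if subs.length = 0 then PySem.List.pyGetD l x []
        else (PySem.List.pyGetD l (x + y) []).foldl
          (fun temp a => (PySem.List.pyRange 0 ((subs.length : Int)) 1).foldl
            (fun temp z => temp ++ [PySem.List.pyGetD subs z 0 + a]) temp) [])
      []
    = runW ((l.drop x.toNat).take length.toNat) := by
  have hcast : ∀ j : Nat, x + ((0 : Int) + (j : Int)) = ((x.toNat + j : Nat) : Int) := by
    intro j; omega
  have hgx : PySem.List.pyGetD l x [] = l.getD x.toNat [] := by
    have hx : x = (x.toNat : Int) := by omega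
    conv_lhs => rw [hx]
    rw [PySem.List.pyGetD_natCast]
  have h1 : (PySem.List.pyRange 0 length 1).foldl
      (fun subs y =>
        if subs.length = 0 then PySem.List.pyGetD l x []
        else (PySem.List.pyGetD l (x + y) []).foldl
          (fun temp a => (PySem.List.pyRange 0 ((subs.length : Int)) 1).foldl
            (fun temp z => temp ++ [PySem.List.pyGetD subs z 0 + a]) temp) [])
      []
      = (List.range length.toNat).foldl
        (fun subs j =>
          if subs.length = 0 then l.getD x.toNat []
          else convL subs (l.getD (x.toNat + j) [])) [] := by
    rw [PySem.List.pyRange_one]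
    rw [List.foldl_map]
    simp only [temp_eq, Int.sub_zero]
    apply PySem.List.foldl_congr_mem
    intro acc j _
    rw [hcast j, PySem.List.pyGetD_natCast, hgx]
  rw [h1]
  have h2 : (List.range length.toNat).foldl
      (fun subs j =>
        if subs.length = 0 then l.getD x.toNat []
        else convL subs (l.getD (x.toNat + j) [])) []
      = ((l.drop x.toNat).take length.toNat).foldl (stepA (l.getD x.toNat [])) [] :=
    foldl_range_getD (stepA (l.getD x.toNat [])) l x.toNat length.toNat hxb []
  rw [h2]
  have hd : l.getD x.toNat [] = ((l.drop x.toNat).take length.toNat).headD [] := by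
    rw [head_take_drop l x.toNat length.toNat (by omega) (by omega)]
  rw [hd]
  rfl

theorem main_neg (l : List (List Int)) (length : Int) (hlen : length ≤ 0) :
    somefunct l length = somefunct_alt l length := by
  simp only [somefunct, somefunct_alt, if_pos hlen]
  have hr : PySem.List.pyRange 0 length 1 = [] := PySem.List.pyRange_one_eq_nil (by omega)
  simp only [hr, List.foldl_nil, List.append_nil, PySem.List.foldl_ignore]
  rfl

theorem A_flat (l : List (List Int)) (length : Int) (hlen : 1 ≤ length) :
    (PySem.List.pyRange 0 ((l.length : Int) - length + 1) 1).foldl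
      (fun subsets x => subsets ++
        (PySem.List.pyRange 0 length 1).foldl
          (fun subs y =>
            if subs.length = 0 then PySem.List.pyGetD l x []
            else (PySem.List.pyGetD l (x + y) []).foldl
              (fun temp a => (PySem.List.pyRange 0 ((subs.length : Int)) 1).foldl
                (fun temp z => temp ++ [PySem.List.pyGetD subs z 0 + a]) temp) [])
          []) []
      = (PySem.List.pyRange 0 ((l.length : Int) - length + 1) 1).flatMap
          (fun x => runW ((l.drop x.toNat).take length.toNat)) := by
  have hmem : ∀ x ∈ PySem.List.pyRange 0 ((l.length : Int) - length + 1) 1,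
      0 ≤ x ∧ x.toNat + length.toNat ≤ l.length := by
    intro x hx
    have := (PySem.List.mem_pyRange_one).mp hx
    omega
  have hcongr := PySem.List.foldl_congr_mem
    (l := PySem.List.pyRange 0 ((l.length : Int) - length + 1) 1)
    (init := ([] : List Int))
    (g := fun subsets x => subsets ++ runW ((l.drop x.toNat).take length.toNat))
    (f := fun subsets x => subsets ++
      (PySem.List.pyRange 0 length 1).foldl
        (fun subs y =>
          if subs.length = 0 then PySem.List.pyGetD l x []
          else (PySem.List.pyGetD l (x + y) []).foldl
            (fun temp a => (PySem.List.pyRange 0 ((subs.length : Int)) 1).foldl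
              (fun temp z => temp ++ [PySem.List.pyGetD subs z 0 + a]) temp) [])
        [])
    (by
      intro acc x hx
      rcases hmem x hx with ⟨hx0, hxb⟩
      simp only [A_window l length x hx0 hxb hlen])
  rw [hcongr, PySem.List.foldl_append_eq_flatMap]
  simp

-- ----- B-side: streaming invariant -----

def stepF (n : Int) (length : Int)
    (st : List (PySem.Dict Int Int) × PySem.Dict Int Int) (is : Int × List Int) :
    List (PySem.Dict Int Int) × PySem.Dict Int Int :=
  let nxt := st.1.map (fun c => convD c is.2)
  let nxt := if is.1 + length ≤ n then nxt ++ [PySem.Dict.counter is.2] else nxt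
  if is.1 ≥ length - 1 then
    (nxt.tail,
     (nxt.headD PySem.Dict.empty).items.foldl (fun t p => t.modify p.1 0 (· + p.2)) st.2)
  else (nxt, st.2)

def gI (l : List (List Int)) (i x : Nat) : PySem.Dict Int Int :=
  PySem.Dict.counter (prodW ((l.drop x).take (i - x)))

def activeS (l : List (List Int)) (LN i : Nat) : List (PySem.Dict Int Int) :=
  (List.range' ((i + 1) - LN) (min i ((l.length + 1) - LN) - ((i + 1) - LN))).map (gI l i)

def totalS (l : List (List Int)) (LN i : Nat) : PySem.Dict Int Int :=
  PySem.Dict.counter (((List.range ((i + 1) - LN)).flatMap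
    (fun x => prodW ((l.drop x).take LN))))

theorem prodW_append_singleton (W : List (List Int)) (s : List Int) (h : W ≠ []) :
    prodW (W ++ [s]) = convL (prodW W) s := by
  rcases W with _ | ⟨h0, t⟩
  · exact absurd rfl h
  · show (t ++ [s]).foldl convL h0 = convL (t.foldl convL h0) s
    rw [List.foldl_append, List.foldl_cons, List.foldl_nil]

theorem prod_snoc (l : List (List Int)) (x i : Nat) (hx : x < i) (hi : i < l.length) :
    prodW ((l.drop x).take (i + 1 - x)) = convL (prodW ((l.drop x).take (i - x))) l[i] := by
  have h1 : i + 1 - x = (i - x) + 1 := by omega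
  have h2 : (l.drop x).take ((i - x) + 1) = (l.drop x).take (i - x) ++ [l[i]] := by
    rw [List.take_succ, List.getElem?_drop]
    have : x + (i - x) = i := by omega
    rw [this, List.getElem?_eq_getElem hi]
    rfl
  rw [h1, h2, prodW_append_singleton]
  intro hc
  have := congrArg List.length hc
  simp at this
  omega

theorem counter_getElem (l : List (List Int)) (i : Nat) (hi : i < l.length) :
    PySem.Dict.counter l[i] = gI l (i + 1) i := by
  unfold gI
  congr 1
  have h1 : i + 1 - i = 1 := by omega
  rw [h1]
  have h2 : (l.drop i).take 1 = [l[i]] := by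
    rw [List.drop_eq_getElem_cons hi]
    rfl
  rw [h2]
  rfl

theorem activeS_eq (l : List (List Int)) (LN i a b : Nat)
    (ha : a = (i + 1) - LN)
    (hb : b = min i ((l.length + 1) - LN) - ((i + 1) - LN)) :
    (List.range' a b).map (gI l i) = activeS l LN i := by
  rw [ha, hb]; rfl

theorem totalS_congr (l : List (List Int)) (LN i j : Nat)
    (h : (i + 1) - LN = (j + 1) - LN) : totalS l LN i = totalS l LN j := by
  unfold totalS; rw [h]

theorem totalS_merge (l : List (List Int)) (LN i : Nat) (hpop : LN ≤ i + 1) :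
    (gI l (i + 1) ((i + 1) - LN)).items.foldl (fun t p => t.modify p.1 0 (· + p.2))
        (totalS l LN i)
      = totalS l LN (i + 1) := by
  have hglo : gI l (i + 1) ((i + 1) - LN)
      = PySem.Dict.counter (prodW ((l.drop ((i + 1) - LN)).take LN)) := by
    have h : (i + 1) - ((i + 1) - LN) = LN := by omega
    unfold gI
    rw [h]
  rw [hglo]
  unfold totalS
  rw [merge_eq _ _ (PySem.Dict.nodup_keys_counter _), ← counter_append]
  congr 1
  have hsucc : (i + 1 + 1) - LN = ((i + 1) - LN) + 1 := by omega
  rw [hsucc, List.range_succ, List.flatMap_append]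
  simp

theorem step_eq (l : List (List Int)) (length : Int) (hL : 1 ≤ length) (i : Nat)
    (hi : i < l.length) :
    stepF (PySem.List.len l) length (activeS l length.toNat i, totalS l length.toNat i)
        ((i : Int), l[i])
      = (activeS l length.toNat (i + 1), totalS l length.toNat (i + 1)) := by
  unfold stepF
  simp only [PySem.List.len_eq]
  have hmap : (activeS l length.toNat i).map (fun c => convD c l[i])
      = (List.range' ((i + 1) - length.toNat)
          (min i ((l.length + 1) - length.toNat) - ((i + 1) - length.toNat))).map
          (gI l (i + 1)) := by
    unfold activeS
    rw [List.map_map]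
    apply List.map_congr_left
    intro x hx
    have hxx := List.mem_range'_1.mp hx
    have hxi : x < i := by omega
    show convD (gI l i x) l[i] = gI l (i + 1) x
    unfold gI
    rw [convD_counter, ← prod_snoc l x i hxi hi]
  by_cases hc : (i : Int) + length ≤ (l.length : Int)
  · -- a new window starts at i
    have happ : (activeS l length.toNat i).map (fun c => convD c l[i])
          ++ [PySem.Dict.counter l[i]]
        = (List.range' ((i + 1) - length.toNat)
            ((min i ((l.length + 1) - length.toNat) - ((i + 1) - length.toNat)) + 1)).map
            (gI l (i + 1)) := by
      rw [hmap, List.range'_concat, List.map_append, counter_getElem l i hi]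
      have h1 : ((i + 1) - length.toNat)
          + 1 * (min i ((l.length + 1) - length.toNat) - ((i + 1) - length.toNat)) = i := by
        omega
      rw [h1, List.map_singleton]
    rw [if_pos hc]
    by_cases hp : (i : Int) ≥ length - 1
    · rw [happ, List.range'_succ, List.map_cons, if_pos hp]
      simp only [List.tail_cons, List.headD_cons]
      refine congrArg₂ Prod.mk ?_ ?_
      · exact activeS_eq l length.toNat (i + 1) _ _ (by omega) (by omega)
      · exact totalS_merge l length.toNat i (by omega)
    · rw [happ, if_neg hp]
      refine congrArg₂ Prod.mk ?_ ?_
      · exact activeS_eq l length.toNat (i + 1) _ _ (by omega) (by omega)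
      · exact totalS_congr l length.toNat i (i + 1) (by omega)
  · -- no new window
    rw [if_neg hc]
    by_cases hp : (i : Int) ≥ length - 1
    · obtain ⟨m, hm⟩ : ∃ m,
          min i ((l.length + 1) - length.toNat) - ((i + 1) - length.toNat) = m + 1 :=
        ⟨min i ((l.length + 1) - length.toNat) - ((i + 1) - length.toNat) - 1, by omega⟩
      rw [hmap, hm, List.range'_succ, List.map_cons, if_pos hp]
      simp only [List.tail_cons, List.headD_cons]
      refine congrArg₂ Prod.mk ?_ ?_
      · exact activeS_eq l length.toNat (i + 1) _ _ (by omega) (by omega)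
      · exact totalS_merge l length.toNat i (by omega)
    · rw [hmap, if_neg hp]
      refine congrArg₂ Prod.mk ?_ ?_
      · exact activeS_eq l length.toNat (i + 1) _ _ (by omega) (by omega)
      · exact totalS_congr l length.toNat i (i + 1) (by omega)

theorem stream_inv (l : List (List Int)) (length : Int) (hL : 1 ≤ length) :
    ∀ i, i ≤ l.length →
      ((PySem.List.enumerate l 0).take i).foldl (stepF (PySem.List.len l) length)
          ([], PySem.Dict.empty)
        = (activeS l length.toNat i, totalS l length.toNat i) := by
  intro i
  induction i with
  | zero =>
    intro _
    have h1 : (0 + 1) - length.toNat = 0 := by omega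
    simp [activeS, totalS, h1]
    rfl
  | succ i ih =>
    intro h
    have hi : i < l.length := by omega
    have htake : (PySem.List.enumerate l 0).take (i + 1)
        = (PySem.List.enumerate l 0).take i ++ [((i : Int), l[i])] := by
      rw [List.take_succ]
      have hget : (PySem.List.enumerate l 0)[i]? = some ((i : Int), l[i]) := by
        rw [PySem.List.getElem?_enumerate, List.getElem?_eq_getElem hi]
        simp
      rw [hget]
      rfl
    rw [htake, List.foldl_append, ih (by omega), List.foldl_cons, List.foldl_nil]
    exact step_eq l length hL i hi

theorem B_stream (l : List (List Int)) (length : Int) (hlen : 1 ≤ length) :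
    somefunct_alt l length
      = (PySem.Dict.counter ((PySem.List.pyRange 0 ((l.length : Int) - length + 1) 1).flatMap
          (fun x => prodW ((l.drop x.toNat).take length.toNat)))).items := by
  have hB : somefunct_alt l length
      = (((PySem.List.enumerate l 0).foldl (stepF (PySem.List.len l) length)
          ([], PySem.Dict.empty)).2).items := by
    simp only [somefunct_alt, if_neg (show ¬ length ≤ 0 by omega)]
    rfl
  have hfull : PySem.List.enumerate l 0 = (PySem.List.enumerate l 0).take l.length := by
    rw [List.take_of_length_le]
    rw [PySem.List.length_enumerate]
  rw [hB, hfull, stream_inv l length hlen l.length le_rfl]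
  show (totalS l length.toNat l.length).items = _
  unfold totalS
  congr 2
  rw [PySem.List.pyRange_one, List.flatMap_map]
  have hM : ((l.length : Int) - length + 1 - 0).toNat = (l.length + 1) - length.toNat := by
    omega
  rw [hM]
  apply List.flatMap_congr
  intro x _
  simp

theorem main_pos (l : List (List Int)) (length : Int) (hlen : 1 ≤ length)
    (hD : ¬ D_somefunct l length) :
    somefunct l length = somefunct_alt l length := by
  have hA : somefunct l length
      = (PySem.Dict.counter ((PySem.List.pyRange 0 ((l.length : Int) - length + 1) 1).flatMap
          (fun x => runW ((l.drop x.toNat).take length.toNat)))).items := by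
    simp only [somefunct, PySem.List.len_eq]
    rw [A_flat l length hlen]
  rw [hA, B_stream l length hlen]
  have hfm : (PySem.List.pyRange 0 ((l.length : Int) - length + 1) 1).flatMap
      (fun x => runW ((l.drop x.toNat).take length.toNat))
      = (PySem.List.pyRange 0 ((l.length : Int) - length + 1) 1).flatMap
        (fun x => prodW ((l.drop x.toNat).take length.toNat)) := by
    apply List.flatMap_congr
    intro x hx
    have hb := (PySem.List.mem_pyRange_one).mp hx
    have hnd : ¬ winD ((l.drop x.toNat).take length.toNat) := by
      intro hw
      exact hD ⟨x.toNat, by omega, by omega, hw⟩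
    exact runA_eq _ hnd
  rw [hfm]

theorem runA_ne (W : List (List Int)) (hw : winD W) : runW W ≠ [] := by
  obtain ⟨hh', hmem, heven⟩ := hw
  rcases W with _ | ⟨h, t⟩
  · simp at hmem
  · have hh : h ≠ [] := hh'
    have hmem' : ([] : List Int) ∈ t := hmem
    show (h :: t).foldl (stepA ((h :: t).headD [])) [] ≠ []
    have hhead : (h :: t).headD [] = h := rfl
    rw [hhead, List.foldl_cons]
    have hfirst : stepA h [] h = h := by unfold stepA; simp
    rw [hfirst]
    set p : List Int → Bool := fun s => s.isEmpty with hp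
    set t0 : List (List Int) := (t.reverse.dropWhile p).reverse with ht0
    set E : List (List Int) := (t.reverse.takeWhile p).reverse with hE
    have hdec : t = t0 ++ E := by
      rw [ht0, hE, ← List.reverse_append, List.takeWhile_append_dropWhile, List.reverse_reverse]
    have hEmem : ∀ s ∈ E, s = ([] : List Int) := by
      intro s hs
      have := List.mem_takeWhile_imp (List.mem_reverse.mp hs)
      simpa [hp, List.isEmpty_iff] using this
    have hErep : E = List.replicate E.length ([] : List Int) := List.eq_replicate_of_mem hEmem
    have hElen : Even E.length := by
      have := trailing_len_eq h t hh
      rw [this] at heven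
      rw [hE]
      simpa using heven
    have hacc1 : t0.foldl (stepA h) h ≠ [] := by
      by_cases ht0nil : t0 = []
      · rw [ht0nil]; exact hh
      · have hdw : t.reverse.dropWhile p ≠ [] := by
          intro hc
          apply ht0nil
          rw [ht0, hc]; rfl
        have hlast : t0.getLast ht0nil ≠ [] := by
          have hnp := List.head_dropWhile_not p hdw
          have hgl : t0.getLast ht0nil = (t.reverse.dropWhile p).head hdw :=
            List.getLast_reverse _
          rw [hgl]
          simpa [hp, List.isEmpty_iff] using hnp
        conv_lhs => rw [← List.dropLast_append_getLast ht0nil]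
        rw [List.foldl_append, List.foldl_cons, List.foldl_nil]
        exact stepA_ne h _ _ hh hlast
    rw [hdec, List.foldl_append]
    conv_lhs => rw [hErep]
    intro hc
    have hodd := ((parity_fold h hh E.length).1 _ hacc1).mp hc
    rw [Nat.even_iff] at hElen
    rw [Nat.odd_iff] at hodd
    omega

theorem valSum_counter (S : List Int) :
    ((PySem.Dict.counter S).items.map (fun p => p.2)).sum = (S.length : Int) := by
  rw [PySem.Dict.items_counter, List.map_map]
  have hcomp : ((fun p : Int × Int => p.2) ∘ fun k => (k, (S.count k : Int)))
      = fun k => ((S.count k : Int)) := rfl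
  rw [hcomp]
  have h1 := sum_count_ofList_filter S (fun _ => true)
  rw [List.filter_true, List.countP_true] at h1
  calc ((PySem.Set.ofList S).map (fun k => ((S.count k : Int)))).sum
      = ((((PySem.Set.ofList S).map (fun k => S.count k)).map (fun n : Nat => (n : Int)))).sum := by
        rw [List.map_map]; rfl
    _ = (((PySem.Set.ofList S).map (fun k => S.count k)).sum : Int) := by
        rw [← Nat.cast_list_sum]
    _ = (S.length : Int) := by rw [h1]

theorem winD_length (l : List (List Int)) (length : Int) (xn : Nat)
    (hw : winD ((l.drop xn).take length.toNat)) : 1 ≤ length := by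
  obtain ⟨_, hmem, _⟩ := hw
  have : ((l.drop xn).take length.toNat).tail ≠ [] := by
    intro hc; rw [hc] at hmem; simp at hmem
  by_contra hc
  have : length.toNat = 0 := by omega
  rw [this] at hmem
  simp at hmem

theorem main_eq (l : List (List Int)) (length : Int) (hD : ¬ D_somefunct l length) :
    somefunct l length = somefunct_alt l length := by
  by_cases hlen : 1 ≤ length
  · exact main_pos l length hlen hD
  · exact main_neg l length (by omega)


-- ===== VERDICT (by name: the statement is the Claim_ definition above) =====
theorem somefunct_spec : Claim_unchanged_somefunct := by
  intro listofsets length _ hD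
  exact main_eq listofsets length hD

theorem somefunct_changed : Claim_changed_somefunct := by
  unfold Claim_changed_somefunct; decide

theorem somefunct_tight : Claim_exact_somefunct := by
  intro l length _ hD heq
  obtain ⟨xn, hlt, hle, hw⟩ := hD
  have hw' : winD ((l.drop xn).take length.toNat) := hw
  have hlen : 1 ≤ length := winD_length l length xn hw'
  have hxmem : (xn : Int) ∈ PySem.List.pyRange 0 ((l.length : Int) - length + 1) 1 := by
    apply (PySem.List.mem_pyRange_one).mpr
    omega
  have hA : somefunct l length
      = (PySem.Dict.counter ((PySem.List.pyRange 0 ((l.length : Int) - length + 1) 1).flatMap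
          (fun x => runW ((l.drop x.toNat).take length.toNat)))).items := by
    simp only [somefunct, PySem.List.len_eq]
    rw [A_flat l length hlen]
  have hB : somefunct_alt l length
      = (PySem.Dict.counter ((PySem.List.pyRange 0 ((l.length : Int) - length + 1) 1).flatMap
          (fun x => prodW ((l.drop x.toNat).take length.toNat)))).items :=
    B_stream l length hlen
  rw [hA, hB] at heq
  have hsum := congrArg (fun L : List (Int × Int) => (L.map (fun p => p.2)).sum) heq
  simp only [valSum_counter] at hsum
  have hlensum : ((PySem.List.pyRange 0 ((l.length : Int) - length + 1) 1).flatMap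
      (fun x => runW ((l.drop x.toNat).take length.toNat))).length
      = ((PySem.List.pyRange 0 ((l.length : Int) - length + 1) 1).flatMap
      (fun x => prodW ((l.drop x.toNat).take length.toNat))).length := by
    exact_mod_cast hsum
  rw [List.length_flatMap, List.length_flatMap] at hlensum
  have hlt' : ((PySem.List.pyRange 0 ((l.length : Int) - length + 1) 1).map
      (fun x => (prodW ((l.drop x.toNat).take length.toNat)).length)).sum
      < ((PySem.List.pyRange 0 ((l.length : Int) - length + 1) 1).map
      (fun x => (runW ((l.drop x.toNat).take length.toNat)).length)).sum := by
    apply List.sum_lt_sum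
    · intro x hx
      by_cases hwx : winD ((l.drop x.toNat).take length.toNat)
      · have h0 : prodW ((l.drop x.toNat).take length.toNat) = [] := by
          obtain ⟨hh, hmem, _⟩ := hwx
          rcases hW : (l.drop x.toNat).take length.toNat with _ | ⟨h, t⟩
          · rfl
          · rw [hW] at hmem
            exact prod_empty_of_mem t hmem h
        rw [h0]
        simp
      · have hre : runW ((l.drop x.toNat).take length.toNat)
            = prodW ((l.drop x.toNat).take length.toNat) := runA_eq _ hwx
        rw [hre]
    · refine ⟨(xn : Int), hxmem, ?_⟩
      have hmem := hw'.2.1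
      have h0 : prodW ((l.drop (xn : Int).toNat).take length.toNat) = [] := by
        simp only [Int.toNat_natCast]
        rcases hW : (l.drop xn).take length.toNat with _ | ⟨h, t⟩
        · rfl
        · rw [hW] at hmem
          show t.foldl convL h = []
          exact prod_empty_of_mem t hmem h
      have hne : runW ((l.drop (xn : Int).toNat).take length.toNat) ≠ [] := by
        simp only [Int.toNat_natCast]
        exact runA_ne _ hw'
      rw [h0]
      simp only [List.length_nil]
      exact List.length_pos_iff.mpr hne
  omega
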